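-- pv_equiv track=rewrite | github.com/NicovincX2/Python-3.5 | Divers/depouillement_elect.py | gagnants_tour2v1
-- ===== SOURCE A (Python) =====
-- def gagnants_tour2v1(a):
--     n=len(a)
--     score=[0]*n
--     score_max=0
--     for i in range(n):
--     # on commence par déterminer l'indice du premier qui a voté pour a[i]
--         i_min=0
--         while a[i_min]!=a[i]:
--             i_min+=1
--         # on ajoute 1 vote dans la bonne pile de bulletins
--         score[i_min]+=1;
--         # on en profite pour tenir à jour le meilleur score
--         if score[i_min]>score_max:
--             score_max=score[i_min]
--     gagnants=[]
--     for i in range(n):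
--         if score[i]==score_max:
--             gagnants.append(a[i])
--     return gagnants
-- ===== SOURCE B (Python) =====
-- def gagnants_tour2v1(a):
--     # Sort a copy; one scan over the sorted list groups runs of consecutive
--     # equal values, tracking the longest run length and the set of values
--     # attaining it; then emit those winners in order of first appearance in a.
--     s = sorted(a)
--     n = len(s)
--     best = 0
--     winners = set()
--     i = 0
--     while i < n:
--         j = i
--         while j < n and s[j] == s[i]:
--             j += 1
--         run = j - i
--         if run > best:
--             best = run
--             winners = {s[i]}
--         elif run == best:
--             winners.add(s[i])
--         i = j
--     out = []
--     seen = set()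
--     for x in a:
--         if x not in seen:
--             seen.add(x)
--             if x in winners:
--                 out.append(x)
--     return out
-- ===== Notes on version B (the rewrite author's own statement) =====
-- stated objective: faster
-- what changed: Replaces A's quadratic per-ballot first-occurrence rescan with a positional score array by a sort-then-group scan: sort a copy, read each value's count off the length of its run of equal neighbours while tracking the best run and the set of values attaining it, then emit winners in first-appearance order.
import Mathlib
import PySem

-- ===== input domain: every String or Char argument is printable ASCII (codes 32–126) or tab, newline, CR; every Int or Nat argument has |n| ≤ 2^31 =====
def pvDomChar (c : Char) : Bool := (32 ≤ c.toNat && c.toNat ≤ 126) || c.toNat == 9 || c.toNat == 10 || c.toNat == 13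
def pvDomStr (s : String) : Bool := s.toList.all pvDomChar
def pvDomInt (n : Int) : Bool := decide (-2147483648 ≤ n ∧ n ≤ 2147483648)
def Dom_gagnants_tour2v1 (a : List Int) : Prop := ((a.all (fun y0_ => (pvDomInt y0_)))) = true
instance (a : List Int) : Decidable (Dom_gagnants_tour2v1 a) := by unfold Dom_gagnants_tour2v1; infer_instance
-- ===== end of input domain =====

-- B replaces A's quadratic first-occurrence rescans by sorting a copy, reading
-- each value's count off its run of equal neighbours in one scan (tracking the
-- best run and the set of values attaining it), then one first-appearance
-- emission pass (same return value).


-- ===== PORT A =====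
-- the 'while a[i_min] != a[i]: i_min += 1' scan from index 0
def firstIdx : List Int → Int → Nat
  | [], _ => 0
  | x :: xs, v => if x ≠ v then firstIdx xs v + 1 else 0

def gagnants_tour2v1 (a : List Int) : List Int :=
  let n : Nat := a.length
  let res :=
    (PySem.List.pyRange 0 (n : Int)).foldl
      (fun (p : List Int × Int) i =>
        let i_min := firstIdx a (PySem.List.pyGetD a i 0)
        let score := p.1.set i_min (p.1.getD i_min 0 + 1)
        let score_max := if score.getD i_min 0 > p.2 then score.getD i_min 0 else p.2
        (score, score_max))
      (List.replicate n (0 : Int), (0 : Int))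
  (PySem.List.pyRange 0 (n : Int)).foldl
    (fun g i =>
      if PySem.List.pyGetD res.1 i 0 = res.2 then g ++ [PySem.List.pyGetD a i 0] else g) []

-- ===== PORT B =====
-- the outer 'while i < n' loop of Source B: each step consumes one run of equal
-- values from the sorted list (the inner 'while j < n and s[j] == s[i]' is the
-- takeWhile/dropWhile split), updating the best run length and the winner set
def runScan : List Int → Int → PySem.Set Int → Int × PySem.Set Int
  | [], best, winners => (best, winners)
  | x :: rest, best, winners =>
    let run : Int := 1 + ((rest.takeWhile (fun y => y == x)).length : Int)
    let tail := rest.dropWhile (fun y => y == x)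
    if run > best then runScan tail run (PySem.Set.ofList [x])
    else if run = best then runScan tail best (PySem.Set.add winners x)
    else runScan tail best winners
termination_by l _ _ => l.length
decreasing_by
  all_goals
    exact Nat.lt_succ_of_le (List.length_dropWhile_le _ _)

def gagnants_tour2v1_alt (a : List Int) : List Int :=
  let s := PySem.List.sorted a (fun x => x) false
  let r := runScan s 0 PySem.Set.empty
  let p :=
    a.foldl
      (fun (p : PySem.Set Int × List Int) x =>
        if PySem.Set.contains p.1 x then p
        else (PySem.Set.add p.1 x, if PySem.Set.contains r.2 x then p.2 ++ [x] else p.2))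
      (PySem.Set.empty, [])
  p.2

-- ===== PRECONDITION & SPEC =====
def Spec_gagnants_tour2v1 (a : List Int) (out : List Int) : Prop := out = gagnants_tour2v1_alt a
instance (a : List Int) (out : List Int) : Decidable (Spec_gagnants_tour2v1 a out) := by unfold Spec_gagnants_tour2v1; infer_instance

-- ===== CLAIM (what is proved, stated in full; the proofs are below) =====
def Claim_equal_gagnants_tour2v1 : Prop := ∀ (a : List Int), Dom_gagnants_tour2v1 a → Spec_gagnants_tour2v1 a (gagnants_tour2v1 a)

-- ===== LEMMAS AND PROOFS =====

theorem firstIdx_lt_length {a : List Int} {v : Int} (h : v ∈ a) : firstIdx a v < a.length := by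
  induction a with
  | nil => cases h
  | cons x xs ih =>
    by_cases hx : x = v
    · simp [firstIdx, hx]
    · have hv : v ∈ xs := by
        rcases List.mem_cons.1 h with h1 | h1
        · exact absurd h1.symm hx
        · exact h1
      have := ih hv
      simp only [firstIdx, List.length_cons]
      rw [if_pos hx]
      omega

theorem getD_firstIdx {a : List Int} {v : Int} (h : v ∈ a) : a.getD (firstIdx a v) 0 = v := by
  induction a with
  | nil => cases h
  | cons x xs ih =>
    by_cases hx : x = v
    · simp [firstIdx, hx]
    · have hv : v ∈ xs := by
        rcases List.mem_cons.1 h with h1 | h1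
        · exact absurd h1.symm hx
        · exact h1
      simp only [firstIdx]
      rw [if_pos hx]
      simpa [List.getD_cons_succ] using ih hv

theorem firstIdx_append_left {xs : List Int} (ys : List Int) {v : Int} (h : v ∈ xs) :
    firstIdx (xs ++ ys) v = firstIdx xs v := by
  induction xs with
  | nil => cases h
  | cons x t ih =>
    by_cases hx : x = v
    · simp [firstIdx, hx]
    · have hv : v ∈ t := by
        rcases List.mem_cons.1 h with h1 | h1
        · exact absurd h1.symm hx
        · exact h1
      simp only [List.cons_append, firstIdx]
      rw [if_pos hx, if_pos hx, ih hv]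

theorem firstIdx_append_right {xs : List Int} (ys : List Int) {v : Int} (h : v ∉ xs) :
    firstIdx (xs ++ ys) v = xs.length + firstIdx ys v := by
  induction xs with
  | nil => simp
  | cons x t ih =>
    have hx : x ≠ v := by rintro rfl; exact h (List.mem_cons_self ..)
    have hv : v ∉ t := fun hv => h (List.mem_cons_of_mem _ hv)
    simp only [List.cons_append, firstIdx, List.length_cons]
    rw [if_pos hx, ih hv]
    omega

-- votes landing in pile j after processing prefix p (a is the full ballot list)
def countIn (a p : List Int) (j : Nat) : Int := (p.countP (fun v => firstIdx a v == j) : Int)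

theorem countIn_append_singleton (a p : List Int) (v : Int) (j : Nat) :
    countIn a (p ++ [v]) j = countIn a p j + if firstIdx a v = j then 1 else 0 := by
  unfold countIn
  rw [List.countP_append]
  by_cases hp : firstIdx a v = j
  · simp [hp]
  · simp [hp]

theorem getD_set (s : List Int) (j k : Nat) (w : Int) (hj : j < s.length) :
    (s.set j w).getD k 0 = if k = j then w else s.getD k 0 := by
  rw [List.getD_eq_getElem?_getD, List.getElem?_set]
  by_cases h : j = k
  · subst h; simp [hj]
  · rw [if_neg h, if_neg (Ne.symm h), ← List.getD_eq_getElem?_getD]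

def stepA (a : List Int) (p : List Int × Int) (v : Int) : List Int × Int :=
  let i_min := firstIdx a v
  let score := p.1.set i_min (p.1.getD i_min 0 + 1)
  let score_max := if score.getD i_min 0 > p.2 then score.getD i_min 0 else p.2
  (score, score_max)

def InvA (a p : List Int) (st : List Int × Int) : Prop :=
  st.1.length = a.length ∧
  (∀ j, j < a.length → st.1.getD j 0 = countIn a p j) ∧
  (∀ j, j < a.length → st.1.getD j 0 ≤ st.2) ∧
  (st.2 = 0 ∨ ∃ j, j < a.length ∧ st.1.getD j 0 = st.2)

theorem loopA_aux (a : List Int) (r : List Int) : ∀ (p : List Int) (st : List Int × Int),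
    a = p ++ r → InvA a p st → InvA a a (r.foldl (stepA a) st) := by
  induction r with
  | nil =>
    intro p st hpa hinv
    rw [List.append_nil] at hpa
    subst hpa
    simpa using hinv
  | cons v t ih =>
    intro p st hpa hinv
    obtain ⟨s, m⟩ := st
    have hva : v ∈ a := by rw [hpa]; simp
    obtain ⟨hlen, hcnt, hle, hattain⟩ := hinv
    simp only at hlen hcnt hle hattain
    have hj : firstIdx a v < a.length := firstIdx_lt_length hva
    have hjs : firstIdx a v < s.length := by rw [hlen]; exact hj
    simp only [List.foldl_cons]
    apply ih (p ++ [v]) _ (by rw [hpa, List.append_assoc]; rfl)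
    have hsetj : (s.set (firstIdx a v) (s.getD (firstIdx a v) 0 + 1)).getD (firstIdx a v) 0
        = s.getD (firstIdx a v) 0 + 1 := by
      rw [getD_set s _ _ _ hjs, if_pos rfl]
    refine ⟨by simp [stepA, hlen], ?_, ?_, ?_⟩
    · intro k hk
      simp only [stepA]
      rw [getD_set s _ _ _ hjs, countIn_append_singleton, ← hcnt k hk]
      by_cases hkj : k = firstIdx a v
      · rw [if_pos hkj, if_pos hkj.symm, hkj]
      · rw [if_neg hkj, if_neg (fun e => hkj e.symm), add_zero]
    · intro k hk
      simp only [stepA, hsetj]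
      rw [getD_set s _ _ _ hjs]
      have h1 := hle k hk
      have h2 := hle (firstIdx a v) hj
      split_ifs <;> omega
    · simp only [stepA, hsetj]
      by_cases hgt : s.getD (firstIdx a v) 0 + 1 > m
      · rw [if_pos hgt]
        right
        exact ⟨firstIdx a v, hj, hsetj⟩
      · rw [if_neg hgt]
        rcases hattain with h0 | ⟨k, hk, hkm⟩
        · left; exact h0
        · right
          by_cases hkj : k = firstIdx a v
          · rw [hkj] at hkm
            exact absurd hgt (by omega)
          · exact ⟨k, hk, by rw [getD_set s _ _ _ hjs, if_neg hkj]; exact hkm⟩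

theorem loopA_final (a : List Int) :
    InvA a a (a.foldl (stepA a) (List.replicate a.length (0 : Int), (0 : Int))) := by
  have hrep : ∀ j : Nat, (List.replicate a.length (0 : Int)).getD j 0 = 0 := by
    intro j
    rw [List.getD_eq_getElem?_getD, List.getElem?_replicate]
    split <;> rfl
  refine loopA_aux a a [] _ (by simp) ⟨by simp, ?_, ?_, ?_⟩
  · intro j _
    simp [countIn]
  · intro j _
    simp
  · left; rfl

theorem countIn_eq (a : List Int) (j : Nat) (hj : j < a.length) :
    countIn a a j =
      if firstIdx a (a.getD j 0) = j then ((a.count (a.getD j 0) : Nat) : Int) else 0 := by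
  unfold countIn
  by_cases hfo : firstIdx a (a.getD j 0) = j
  · rw [if_pos hfo]
    have : a.countP (fun v => firstIdx a v == j) = a.count (a.getD j 0) := by
      rw [List.count_eq_countP]
      apply List.countP_congr
      intro v hv
      simp only [beq_iff_eq]
      constructor
      · intro h
        have h2 := getD_firstIdx hv
        rw [h] at h2
        exact h2.symm
      · intro h
        rw [h]
        exact hfo
    rw [this]
  · rw [if_neg hfo]
    have : a.countP (fun v => firstIdx a v == j) = 0 := by
      rw [List.countP_eq_zero]
      intro v hv hb
      have h1 : firstIdx a v = j := by simpa using hb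
      have h2 := getD_firstIdx hv
      rw [h1] at h2
      rw [h2] at hfo
      exact hfo h1
    rw [this]
    rfl

-- max-multiplicity characterisation is unique
def IsMaxCount (a : List Int) (m : Int) : Prop :=
  (∀ x ∈ a, ((a.count x : Nat) : Int) ≤ m) ∧ (m = 0 ∨ ∃ x ∈ a, ((a.count x : Nat) : Int) = m)

theorem isMaxCount_unique {a : List Int} {m₁ m₂ : Int}
    (h₁ : IsMaxCount a m₁) (h₂ : IsMaxCount a m₂) : m₁ = m₂ := by
  obtain ⟨hb1, ha1⟩ := h₁
  obtain ⟨hb2, ha2⟩ := h₂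
  rcases ha1 with h10 | ⟨x, hx, hxv⟩ <;> rcases ha2 with h20 | ⟨y, hy, hyv⟩
  · rw [h10, h20]
  · have h1 := hb1 y hy
    have h2 := List.count_pos_iff.2 hy
    omega
  · have h1 := hb2 x hx
    have h2 := List.count_pos_iff.2 hx
    omega
  · have h1 := hb2 x hx
    have h2 := hb1 y hy
    omega

theorem scoreMax_isMaxCount (a : List Int) :
    IsMaxCount a (a.foldl (stepA a) (List.replicate a.length (0 : Int), (0 : Int))).2 := by
  obtain ⟨hlen, hcnt, hle, hattain⟩ := loopA_final a
  constructor
  · intro x hx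
    have hj := firstIdx_lt_length hx
    have h1 := hcnt _ hj
    have h2 := countIn_eq a (firstIdx a x) hj
    rw [getD_firstIdx hx, if_pos rfl] at h2
    have h3 := hle _ hj
    rw [h1, h2] at h3
    exact h3
  · rcases hattain with h0 | ⟨j, hj, hjv⟩
    · left; exact h0
    · rw [hcnt j hj, countIn_eq a j hj] at hjv
      by_cases hfo : firstIdx a (a.getD j 0) = j
      · right
        refine ⟨a.getD j 0, ?_, ?_⟩
        · rw [List.getD_eq_getElem?_getD, List.getElem?_eq_getElem hj]
          exact List.getElem_mem hj
        · rw [if_pos hfo] at hjv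
          exact hjv
      · rw [if_neg hfo] at hjv
        left; exact hjv.symm

-- first occurrences, emitted in index order, are exactly set(a)'s insertion order
theorem range_filter_firstocc (a : List Int) :
    ((List.range a.length).filter (fun j => firstIdx a (a.getD j 0) == j)).map
        (fun j => a.getD j 0) = PySem.Set.ofList a := by
  induction a using List.reverseRecOn with
  | nil => simp
  | append_singleton xs x ih =>
    have hlen : (xs ++ [x]).length = xs.length + 1 := by simp
    rw [hlen, List.range_succ, List.filter_append, List.map_append]
    have hgd : ∀ j ∈ List.range xs.length, (xs ++ [x]).getD j 0 = xs.getD j 0 :=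
      fun j hj => List.getD_append _ _ _ _ (List.mem_range.1 hj)
    have hmemgd : ∀ j ∈ List.range xs.length, xs.getD j 0 ∈ xs := by
      intro j hj
      have hjl := List.mem_range.1 hj
      rw [List.getD_eq_getElem?_getD, List.getElem?_eq_getElem hjl]
      exact List.getElem_mem hjl
    have hp : ∀ j ∈ List.range xs.length,
        (firstIdx (xs ++ [x]) ((xs ++ [x]).getD j 0) == j) = (firstIdx xs (xs.getD j 0) == j) := by
      intro j hj
      rw [hgd j hj, firstIdx_append_left _ (hmemgd j hj)]
    have hpre : ((List.range xs.length).filter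
          (fun j => firstIdx (xs ++ [x]) ((xs ++ [x]).getD j 0) == j)).map
          (fun j => (xs ++ [x]).getD j 0)
        = ((List.range xs.length).filter (fun j => firstIdx xs (xs.getD j 0) == j)).map
          (fun j => xs.getD j 0) := by
      rw [List.filter_congr hp]
      apply List.map_congr_left
      intro j hjf
      exact hgd j (List.mem_filter.1 hjf).1
    rw [hpre, ih]
    have hx0 : (xs ++ [x]).getD xs.length 0 = x := by
      rw [List.getD_eq_getElem?_getD, List.getElem?_append_right (le_refl _)]
      simp
    by_cases hmem : x ∈ xs
    · have h1 : firstIdx (xs ++ [x]) x = firstIdx xs x := firstIdx_append_left _ hmem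
      have hne : firstIdx xs x ≠ xs.length := Nat.ne_of_lt (firstIdx_lt_length hmem)
      rw [PySem.Set.ofList_append_singleton, PySem.Set.add_of_mem ((PySem.Set.mem_ofList _ _).2 hmem)]
      simp [h1, hne]
    · have h1 : firstIdx (xs ++ [x]) x = xs.length := by
        rw [firstIdx_append_right _ hmem]
        simp [firstIdx]
      rw [PySem.Set.ofList_append_singleton,
        PySem.Set.add_of_not_mem (fun hc => hmem ((PySem.Set.mem_ofList _ _).1 hc))]
      simp [h1]

-- the emission pass emits, among the first occurrences, those passing the test q
theorem emit_aux (q : Int → Bool) (l : List Int) :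
    ∀ (s : PySem.Set Int) (o : List Int),
    (l.foldl
        (fun (p : PySem.Set Int × List Int) x =>
          if PySem.Set.contains p.1 x then p
          else (PySem.Set.add p.1 x, if q x then p.2 ++ [x] else p.2)) (s, o)).2
      = o ++ (PySem.Set.ofList l).filter (fun x => !s.contains x && q x) := by
  induction l with
  | nil => intro s o; simp
  | cons x t ih =>
    intro s o
    simp only [List.foldl_cons]
    by_cases hx : x ∈ s
    · have hcx : PySem.Set.contains s x = true := (PySem.Set.contains_iff s x).2 hx
      rw [PySem.Set.ofList_cons]
      simp only [hcx, if_true]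
      rw [ih s o]
      congr 1
      rw [List.filter_cons]
      have hxf : (!s.contains x && q x) = false := by
        simp [List.contains_eq_mem, hx]
      rw [hxf, if_neg (by simp)]
      simp only [PySem.Set.discard, List.filter_filter]
      apply List.filter_congr
      intro y hy
      by_cases hys : y ∈ s
      · simp [List.contains_eq_mem, hys]
      · have hyx : y ≠ x := fun e => hys (e ▸ hx)
        simp [List.contains_eq_mem, hys, hyx]
    · have hcx : PySem.Set.contains s x = false := by
        simp [PySem.Set.contains, List.contains_eq_mem, hx]
      simp only [hcx, Bool.false_eq_true, if_false]
      rw [PySem.Set.add_of_not_mem hx]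
      rw [ih (s ++ [x]) _]
      rw [PySem.Set.ofList_cons, List.filter_cons]
      have hxt : (!s.contains x && q x) = q x := by
        simp [List.contains_eq_mem, hx]
      rw [hxt]
      have hfil : (PySem.Set.ofList t).filter
            (fun y => !(s ++ [x]).contains y && q y)
          = (PySem.Set.discard (PySem.Set.ofList t) x).filter
            (fun y => !s.contains y && q y) := by
        simp only [PySem.Set.discard, List.filter_filter]
        apply List.filter_congr
        intro y hy
        by_cases hys : y ∈ s
        · simp [List.contains_eq_mem, hys]
        · by_cases hyx : y = x
          · subst hyx
            simp [List.contains_eq_mem, hys]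
          · simp [List.contains_eq_mem, hys, hyx]
      rw [hfil]
      cases hc : q x
      · simp [hc]
      · simp [hc]

theorem portA_eq (a : List Int) :
    gagnants_tour2v1 a =
      (PySem.Set.ofList a).filter (fun x => decide (((a.count x : Nat) : Int) =
        (a.foldl (stepA a) (List.replicate a.length (0 : Int), (0 : Int))).2)) := by
  have hA : gagnants_tour2v1 a =
      (PySem.List.pyRange 0 (a.length : Int)).foldl
        (fun g i =>
          if PySem.List.pyGetD
              ((PySem.List.pyRange 0 (a.length : Int)).foldl
                (fun acc j => stepA a acc (PySem.List.pyGetD a j 0))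
                (List.replicate a.length (0 : Int), (0 : Int))).1 i 0
            = ((PySem.List.pyRange 0 (a.length : Int)).foldl
                (fun acc j => stepA a acc (PySem.List.pyGetD a j 0))
                (List.replicate a.length (0 : Int), (0 : Int))).2
          then g ++ [PySem.List.pyGetD a i 0] else g) [] := rfl
  rw [hA, PySem.List.foldl_pyRange_zero_pyGetD' a 0 (stepA a)]
  have hrange : PySem.List.pyRange 0 (a.length : Int) =
      (List.range a.length).map (fun k : Nat => (k : Int)) := by
    rw [PySem.List.pyRange_one]
    simp
  rw [hrange, List.foldl_map]
  simp only [PySem.List.pyGetD_natCast]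
  rw [PySem.List.foldl_append_ite
    (p := fun j : Nat =>
      (a.foldl (stepA a) (List.replicate a.length (0 : Int), (0 : Int))).1.getD j 0 =
        (a.foldl (stepA a) (List.replicate a.length (0 : Int), (0 : Int))).2)
    (f := fun j : Nat => a.getD j 0), List.nil_append]
  have hM := scoreMax_isMaxCount a
  obtain ⟨hlen, hcnt, hle, hattain⟩ := loopA_final a
  have hM1 : ∀ j ∈ List.range a.length,
      (decide ((a.foldl (stepA a) (List.replicate a.length (0 : Int), (0 : Int))).1.getD j 0 =
        (a.foldl (stepA a) (List.replicate a.length (0 : Int), (0 : Int))).2))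
      = (decide (((a.count (a.getD j 0) : Nat) : Int) =
          (a.foldl (stepA a) (List.replicate a.length (0 : Int), (0 : Int))).2)
         && (firstIdx a (a.getD j 0) == j)) := by
    intro j hjr
    have hj := List.mem_range.1 hjr
    rw [hcnt j hj, countIn_eq a j hj]
    by_cases hfo : firstIdx a (a.getD j 0) = j
    · rw [if_pos hfo]
      have hbt : (firstIdx a (a.getD j 0) == j) = true := beq_iff_eq.mpr hfo
      rw [hbt, Bool.and_true]
    · have hane : a ≠ [] := by
        intro e
        rw [e] at hj
        simp at hj
      obtain ⟨y, hy⟩ := List.exists_mem_of_ne_nil a hane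
      have hb := hM.1 y hy
      have hpos := List.count_pos_iff.2 hy
      have hMne : ¬ ((0 : Int) =
          (a.foldl (stepA a) (List.replicate a.length (0 : Int), (0 : Int))).2) := by omega
      rw [if_neg hfo]
      have hbf : (firstIdx a (a.getD j 0) == j) = false := beq_eq_false_iff_ne.mpr hfo
      rw [hbf, Bool.and_false, decide_eq_false hMne]
  rw [List.filter_congr hM1, ← List.filter_filter]
  have hcomm : (((List.range a.length).filter (fun j => firstIdx a (a.getD j 0) == j)).filter
        (fun j => decide (((a.count (a.getD j 0) : Nat) : Int) =
          (a.foldl (stepA a) (List.replicate a.length (0 : Int), (0 : Int))).2))).map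
        (fun j => a.getD j 0)
      = ((((List.range a.length).filter (fun j => firstIdx a (a.getD j 0) == j)).map
          (fun j => a.getD j 0)).filter
        (fun x => decide (((a.count x : Nat) : Int) =
          (a.foldl (stepA a) (List.replicate a.length (0 : Int), (0 : Int))).2))) := by
    rw [List.filter_map]
    rfl
  rw [hcomm, range_filter_firstocc]

-- ===== B-side lemmas =====

theorem not_mem_dropWhile_eq (x : Int) : ∀ (l : List Int), l.Pairwise (· ≤ ·) →
    (∀ y ∈ l, x ≤ y) → x ∉ l.dropWhile (fun y => y == x) := by
  intro l
  induction l with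
  | nil => intro _ _ h; simp at h
  | cons z t ih =>
    intro hp hle
    obtain ⟨hz, ht⟩ := List.pairwise_cons.1 hp
    by_cases hzx : z = x
    · rw [List.dropWhile_cons_of_pos (by simp [hzx])]
      exact ih ht (fun y hy => hle y (List.mem_cons_of_mem _ hy))
    · rw [List.dropWhile_cons_of_neg (by simp [hzx])]
      intro hmem
      rcases List.mem_cons.1 hmem with h | h
      · exact hzx h.symm
      · have h1 : x ≤ z := hle z (List.mem_cons_self ..)
        have h2 : x < z := lt_of_le_of_ne h1 (fun e => hzx e.symm)
        have h3 : z ≤ x := hz x h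
        omega

theorem runScan_spec : ∀ (n : Nat) (s : List Int), s.length ≤ n → s.Pairwise (· ≤ ·) →
    ∀ (best : Int) (w : PySem.Set Int),
    best ≤ (runScan s best w).1 ∧
    (∀ x ∈ s, ((s.count x : Nat) : Int) ≤ (runScan s best w).1) ∧
    ((runScan s best w).1 = best ∨ ∃ x ∈ s, ((s.count x : Nat) : Int) = (runScan s best w).1) ∧
    (∀ x, x ∈ (runScan s best w).2 ↔
      (x ∈ w ∧ (runScan s best w).1 = best) ∨
      (x ∈ s ∧ ((s.count x : Nat) : Int) = (runScan s best w).1)) := by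
  intro n
  induction n with
  | zero =>
    intro s hlen _ best w
    have hs : s = [] := List.eq_nil_of_length_eq_zero (Nat.le_zero.1 hlen)
    subst hs
    simp [runScan]
  | succ n ih =>
    intro s hlen hsort best w
    cases s with
    | nil => simp [runScan]
    | cons x rest =>
      obtain ⟨hxle, hrest⟩ := List.pairwise_cons.1 hsort
      set t := rest.takeWhile (fun y => y == x) with ht
      set tail := rest.dropWhile (fun y => y == x) with htl
      have hrt : rest = t ++ tail := (List.takeWhile_append_dropWhile ..).symm
      have htmem : ∀ y ∈ t, y = x := by
        intro y hy
        have := List.mem_takeWhile_imp hy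
        simpa using this
      have htailsub : tail.Sublist rest := List.dropWhile_sublist _
      have htailsort : tail.Pairwise (· ≤ ·) := hrest.sublist htailsub
      have hxtail : x ∉ tail := not_mem_dropWhile_eq x rest hrest hxle
      have htaillen : tail.length ≤ n := by
        have h1 : tail.length ≤ rest.length := by
          rw [htl]; exact List.length_dropWhile_le _ _
        simp only [List.length_cons] at hlen
        omega
      -- counts
      have hcx : (((x :: rest).count x : Nat) : Int) = 1 + (t.length : Int) := by
        have h1 : rest.count x = t.length := by
          rw [hrt, List.count_append]
          have h2 : t.count x = t.length := List.count_eq_length.2 (fun b hb => (htmem b hb).symm)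
          have h3 : tail.count x = 0 := List.count_eq_zero.2 hxtail
          omega
        rw [List.count_cons_self, h1]
        push_cast
        ring
      have hcy : ∀ y, y ≠ x → (x :: rest).count y = tail.count y := by
        intro y hyx
        have h2 : t.count y = 0 := List.count_eq_zero.2 (fun hy => hyx (htmem y hy))
        have h3 : (x :: rest).count y = rest.count y := by
          simp [List.count_cons]
          exact fun e => hyx e.symm
        rw [h3, hrt, List.count_append, h2]
        omega
      have hmemsplit : ∀ y, y ∈ x :: rest ↔ y = x ∨ y ∈ tail := by
        intro y
        constructor
        · intro h
          rcases List.mem_cons.1 h with h | h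
          · left; exact h
          · rw [hrt] at h
            rcases List.mem_append.1 h with h | h
            · left; exact htmem y h
            · right; exact h
        · intro h
          rcases h with h | h
          · rw [h]; exact List.mem_cons_self ..
          · exact List.mem_cons_of_mem _ (hrt ▸ List.mem_append_right t h)
      have hrun : runScan (x :: rest) best w =
          if 1 + (t.length : Int) > best then runScan tail (1 + (t.length : Int)) (PySem.Set.ofList [x])
          else if 1 + (t.length : Int) = best then runScan tail best (PySem.Set.add w x)
          else runScan tail best w := by
        conv_lhs => rw [runScan]
      rw [hrun]
      split_ifs with h1 h2
      · -- run > best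
        obtain ⟨ih1, ih2, ih3, ih4⟩ := ih tail htaillen htailsort (1 + (t.length : Int)) (PySem.Set.ofList [x])
        refine ⟨by omega, ?_, ?_, ?_⟩
        · intro y hy
          rcases (hmemsplit y).1 hy with h | h
          · subst h; rw [hcx]; exact ih1
          · have hyx : y ≠ x := fun e => hxtail (e ▸ h)
            have := ih2 y h
            rw [hcy y hyx]
            exact this
        · rcases ih3 with h | ⟨y, hy, hyv⟩
          · right
            exact ⟨x, List.mem_cons_self .., by rw [hcx, h]⟩
          · right
            have hyx : y ≠ x := fun e => hxtail (e ▸ hy)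
            refine ⟨y, (hmemsplit y).2 (Or.inr hy), ?_⟩
            rw [hcy y hyx]
            exact hyv
        · intro y
          rw [ih4 y]
          have hRne : (runScan tail (1 + (t.length : Int)) (PySem.Set.ofList [x])).1 ≠ best := by omega
          have hsing : y ∈ PySem.Set.ofList [x] ↔ y = x := by
            rw [PySem.Set.mem_ofList]; simp
          constructor
          · rintro (⟨hyw, hR⟩ | ⟨hy, hv⟩)
            · rw [hsing] at hyw
              subst hyw
              exact Or.inr ⟨List.mem_cons_self .., by rw [hcx]; exact hR.symm⟩
            · have hyx : y ≠ x := fun e => hxtail (e ▸ hy)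
              exact Or.inr ⟨(hmemsplit y).2 (Or.inr hy), by rw [hcy y hyx]; exact hv⟩
          · rintro (⟨_, hR⟩ | ⟨hy, hv⟩)
            · exact absurd hR hRne
            · rcases (hmemsplit y).1 hy with h | h
              · subst h
                rw [hcx] at hv
                exact Or.inl ⟨hsing.2 rfl, hv.symm⟩
              · have hyx : y ≠ x := fun e => hxtail (e ▸ h)
                rw [hcy y hyx] at hv
                exact Or.inr ⟨h, hv⟩
      · -- run = best
        obtain ⟨ih1, ih2, ih3, ih4⟩ := ih tail htaillen htailsort best (PySem.Set.add w x)
        refine ⟨ih1, ?_, ?_, ?_⟩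
        · intro y hy
          rcases (hmemsplit y).1 hy with h | h
          · subst h; rw [hcx, h2]; exact ih1
          · have hyx : y ≠ x := fun e => hxtail (e ▸ h)
            have := ih2 y h
            rw [hcy y hyx]
            exact this
        · rcases ih3 with h | ⟨y, hy, hyv⟩
          · left; exact h
          · right
            have hyx : y ≠ x := fun e => hxtail (e ▸ hy)
            exact ⟨y, (hmemsplit y).2 (Or.inr hy), by rw [hcy y hyx]; exact hyv⟩
        · intro y
          rw [ih4 y]
          constructor
          · rintro (⟨hyw, hR⟩ | ⟨hy, hv⟩)
            · rcases (PySem.Set.mem_add _ _ _).1 hyw with h | h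
              · exact Or.inl ⟨h, hR⟩
              · subst h
                exact Or.inr ⟨List.mem_cons_self .., by rw [hcx, h2]; exact hR.symm⟩
            · have hyx : y ≠ x := fun e => hxtail (e ▸ hy)
              exact Or.inr ⟨(hmemsplit y).2 (Or.inr hy), by rw [hcy y hyx]; exact hv⟩
          · rintro (⟨hyw, hR⟩ | ⟨hy, hv⟩)
            · exact Or.inl ⟨(PySem.Set.mem_add _ _ _).2 (Or.inl hyw), hR⟩
            · rcases (hmemsplit y).1 hy with h | h
              · subst h
                rw [hcx] at hv
                exact Or.inl ⟨(PySem.Set.mem_add _ _ _).2 (Or.inr rfl), by omega⟩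
              · have hyx : y ≠ x := fun e => hxtail (e ▸ h)
                rw [hcy y hyx] at hv
                exact Or.inr ⟨h, hv⟩
      · -- run < best
        obtain ⟨ih1, ih2, ih3, ih4⟩ := ih tail htaillen htailsort best w
        refine ⟨ih1, ?_, ?_, ?_⟩
        · intro y hy
          rcases (hmemsplit y).1 hy with h | h
          · subst h; rw [hcx]; omega
          · have hyx : y ≠ x := fun e => hxtail (e ▸ h)
            have := ih2 y h
            rw [hcy y hyx]
            exact this
        · rcases ih3 with h | ⟨y, hy, hyv⟩
          · left; exact h
          · right
            have hyx : y ≠ x := fun e => hxtail (e ▸ hy)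
            exact ⟨y, (hmemsplit y).2 (Or.inr hy), by rw [hcy y hyx]; exact hyv⟩
        · intro y
          rw [ih4 y]
          constructor
          · rintro (⟨hyw, hR⟩ | ⟨hy, hv⟩)
            · exact Or.inl ⟨hyw, hR⟩
            · have hyx : y ≠ x := fun e => hxtail (e ▸ hy)
              exact Or.inr ⟨(hmemsplit y).2 (Or.inr hy), by rw [hcy y hyx]; exact hv⟩
          · rintro (⟨hyw, hR⟩ | ⟨hy, hv⟩)
            · exact Or.inl ⟨hyw, hR⟩
            · rcases (hmemsplit y).1 hy with h | h
              · subst h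
                rw [hcx] at hv
                omega
              · have hyx : y ≠ x := fun e => hxtail (e ▸ h)
                rw [hcy y hyx] at hv
                exact Or.inr ⟨h, hv⟩

theorem runScan_sorted_a (a : List Int) :
    IsMaxCount a (runScan (PySem.List.sorted a (fun x => x) false) 0 PySem.Set.empty).1 ∧
    (∀ x, x ∈ (runScan (PySem.List.sorted a (fun x => x) false) 0 PySem.Set.empty).2 ↔
      (x ∈ a ∧ ((a.count x : Nat) : Int) =
        (runScan (PySem.List.sorted a (fun x => x) false) 0 PySem.Set.empty).1)) := by
  set s := PySem.List.sorted a (fun x => x) false with hs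
  have hperm : s.Perm a := PySem.List.sorted_perm a (fun x => x) false
  have hsort : s.Pairwise (· ≤ ·) := by
    have := PySem.List.sorted_pairwise a (fun x => x)
    simpa using this
  have hcount : ∀ x, s.count x = a.count x := fun x => hperm.count_eq x
  have hmem : ∀ x, x ∈ s ↔ x ∈ a := fun x => hperm.mem_iff
  obtain ⟨h1, h2, h3, h4⟩ := runScan_spec s.length s (le_refl _) hsort 0 PySem.Set.empty
  refine ⟨⟨?_, ?_⟩, ?_⟩
  · intro x hx
    have := h2 x ((hmem x).2 hx)
    rw [hcount x] at this
    exact this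
  · rcases h3 with h | ⟨x, hx, hv⟩
    · left; exact h
    · right
      exact ⟨x, (hmem x).1 hx, by rw [← hcount x]; exact hv⟩
  · intro x
    rw [h4 x]
    constructor
    · rintro (⟨hx, _⟩ | ⟨hx, hv⟩)
      · exact absurd hx (by simp [PySem.Set.empty])
      · exact ⟨(hmem x).1 hx, by rw [← hcount x]; exact hv⟩
    · rintro ⟨hx, hv⟩
      exact Or.inr ⟨(hmem x).2 hx, by rw [hcount x]; exact hv⟩

theorem portB_eq (a : List Int) :
    gagnants_tour2v1_alt a =
      (PySem.Set.ofList a).filter (fun x => decide (((a.count x : Nat) : Int) =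
        (runScan (PySem.List.sorted a (fun x => x) false) 0 PySem.Set.empty).1)) := by
  unfold gagnants_tour2v1_alt
  rw [emit_aux]
  rw [List.nil_append]
  apply List.filter_congr
  intro x hxm
  have hxa : x ∈ a := (PySem.Set.mem_ofList _ _).1 hxm
  have hempty : (PySem.Set.empty : PySem.Set Int).contains x = false := rfl
  rw [hempty]
  obtain ⟨_, hmem⟩ := runScan_sorted_a a
  rw [Bool.not_false, Bool.true_and, Bool.eq_iff_iff]
  rw [PySem.Set.contains_iff, hmem x]
  simp [hxa]

-- ===== VERDICT (by name: the statement is the Claim_ definition above) =====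
theorem gagnants_tour2v1_spec : Claim_equal_gagnants_tour2v1 := by
  intro a _
  show gagnants_tour2v1 a = gagnants_tour2v1_alt a
  rw [portA_eq, portB_eq,
    isMaxCount_unique (scoreMax_isMaxCount a) (runScan_sorted_a a).1]
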